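-- pv_equiv track=rewrite | github.com/MindaugasBernatavicius/SdaPythonDemos | 08_DesignPatternsAndBestPractices/_08_student_questions.py | traverse_list
-- ===== SOURCE A (Python) =====
-- def traverse_list(lst: list):
--     filtered_items = []
--     for item in lst:
--         if item == "Jonas":
--             return
--         else:
--             filtered_items.append(item)
--
--     # ... do something with the filtered_items
--     transformed_items = filtered_items
--     return transformed_items
-- ===== SOURCE B (Python) =====
-- def traverse_list(lst: list):
--     if "Jonas" in lst:
--         return None
--     return lst[:]
-- ===== Notes on version B (the rewrite author's own statement) =====
-- stated objective: simpler
-- what changed: Replaced A's fused copy-loop with early return by a membership test followed by a whole-list slice copy.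
import Mathlib
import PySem

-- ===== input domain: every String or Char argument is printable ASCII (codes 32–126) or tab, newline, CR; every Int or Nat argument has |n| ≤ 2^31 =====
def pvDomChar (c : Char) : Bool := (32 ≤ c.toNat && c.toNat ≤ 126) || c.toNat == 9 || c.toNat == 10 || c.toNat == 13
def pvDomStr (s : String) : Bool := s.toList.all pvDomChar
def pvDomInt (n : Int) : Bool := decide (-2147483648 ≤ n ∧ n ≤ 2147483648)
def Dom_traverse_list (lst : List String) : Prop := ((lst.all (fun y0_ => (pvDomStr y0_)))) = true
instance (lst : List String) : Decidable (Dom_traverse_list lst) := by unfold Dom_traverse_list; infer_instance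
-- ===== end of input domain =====

-- B replaces A's fused append-loop with early exit by a membership test then a whole-list copy (simpler).

-- ===== PORT A =====
-- A: loop over lst, appending to filtered_items, returning None on "Jonas".
def traverseListGo (acc : List String) : List String → Option (List String)
  | [] => some acc
  | item :: rest => if item == "Jonas" then none else traverseListGo (acc ++ [item]) rest

def traverse_list (lst : List String) : Option (List String) :=
  traverseListGo [] lst

-- ===== PORT B =====
def traverse_list_alt (lst : List String) : Option (List String) :=
  if "Jonas" ∈ lst then none else some lst

-- ===== PRECONDITION & SPEC =====
def Spec_traverse_list (lst : List String) (out : Option (List String)) : Prop := out = traverse_list_alt lst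
instance (lst : List String) (out : Option (List String)) : Decidable (Spec_traverse_list lst out) := by unfold Spec_traverse_list; infer_instance

-- ===== CLAIM (what is proved, stated in full; the proofs are below) =====
def Claim_equal_traverse_list : Prop := ∀ (lst : List String), Dom_traverse_list lst → Spec_traverse_list lst (traverse_list lst)

-- ===== LEMMAS AND PROOFS =====
theorem traverseListGo_eq (lst : List String) : ∀ (acc : List String),
    traverseListGo acc lst = if "Jonas" ∈ lst then none else some (acc ++ lst) := by
  induction lst with
  | nil => intro acc; simp [traverseListGo]
  | cons x rest ih =>
    intro acc
    by_cases hx : x = "Jonas"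
    · simp [traverseListGo, hx]
    · rw [traverseListGo]; simp only [beq_iff_eq, hx, if_false, ih, List.mem_cons]
      have : ¬ ("Jonas" = x) := fun h => hx h.symm
      simp [this]

-- ===== VERDICT (by name: the statement is the Claim_ definition above) =====
theorem traverse_list_spec : Claim_equal_traverse_list := by
  intro lst _
  unfold Spec_traverse_list traverse_list traverse_list_alt
  simp [traverseListGo_eq]
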